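-- pv_equiv track=rewrite | github.com/SofiaPareja/Tarea1_GAL | Tarea1.py | vector_palabras_clavas
-- ===== SOURCE A (Python) =====
-- def vector_palabras_clavas(tweet, palabras_clave):
--     w = [0,0,0,0,0,0]
--
--     for clave in palabras_clave:
--         for word in tweet:
--             if word.lower()==clave.lower():
--                 i = palabras_clave.index(clave)
--                 w[i] = 1
--     return w
-- ===== SOURCE B (Python) =====
-- def vector_palabras_clavas(tweet, palabras_clave):
--     index = {}
--     for i, clave in enumerate(palabras_clave):
--         index.setdefault(clave.lower(), []).append(i)
--     w = [0, 0, 0, 0, 0, 0]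
--     for word in tweet:
--         for i in index.get(word.lower(), ()):
--             w[i] = 1
--     return w
-- ===== Notes on version B (the rewrite author's own statement) =====
-- stated objective: faster
-- what changed: Replaces A's keyword-driven nested rescan of the tweet (with a repeated list.index pass per match) by building an inverted index clave.lower() -> keyword positions once and then making a single pass over the tweet words; Pre_ excludes keyword lists with an exact duplicate that matches a tweet word (A's .index-based first-occurrence-only marking there is accidental, B marks every occurrence) and inputs where a matching keyword first occurs at position >= 6 (both programs raise IndexError).
-- outside the precondition, e.g. on vector_palabras_clavas(['a'], ['a', 'x', 'a']): A returns [1, 0, 0, 0, 0, 0], B returns [1, 0, 1, 0, 0, 0]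
import Mathlib
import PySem

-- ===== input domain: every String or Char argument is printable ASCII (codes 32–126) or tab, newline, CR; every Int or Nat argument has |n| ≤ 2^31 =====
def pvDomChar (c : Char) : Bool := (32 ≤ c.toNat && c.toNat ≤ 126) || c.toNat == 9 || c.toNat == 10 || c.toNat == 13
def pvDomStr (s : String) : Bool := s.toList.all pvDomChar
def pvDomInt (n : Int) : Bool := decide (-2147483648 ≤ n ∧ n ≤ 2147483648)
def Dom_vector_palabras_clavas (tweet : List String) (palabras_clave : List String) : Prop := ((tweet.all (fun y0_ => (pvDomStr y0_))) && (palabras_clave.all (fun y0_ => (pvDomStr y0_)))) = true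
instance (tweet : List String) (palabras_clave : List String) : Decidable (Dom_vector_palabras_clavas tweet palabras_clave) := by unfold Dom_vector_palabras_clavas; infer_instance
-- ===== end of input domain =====

-- B builds an inverted index clave.lower() -> keyword positions once and then makes one pass over
-- the tweet words, instead of A's per-keyword rescan of the whole tweet (objective: faster).

-- ===== PORT A =====
def vector_palabras_clavas (tweet : List String) (palabras_clave : List String) : List Int :=
  let w : List Int := [0, 0, 0, 0, 0, 0]
  palabras_clave.foldl (fun w clave =>
    tweet.foldl (fun w word =>
      if PySem.Str.lower word == PySem.Str.lower clave then
        -- w[i] = 1 with i = palabras_clave.index(clave); inside Pre_ the index is < 6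
        w.set ((PySem.List.index? palabras_clave clave).getD 0) 1
      else w) w) w

-- ===== PORT B =====
def vector_palabras_clavas_alt (tweet : List String) (palabras_clave : List String) : List Int :=
  -- index.setdefault(clave.lower(), []).append(i)  ==  index[k] = index.get(k, []) + [i]
  let index : PySem.Dict String (List Int) :=
    (PySem.List.enumerate palabras_clave 0).foldl
      (fun d p => PySem.Dict.modify d (PySem.Str.lower p.2) [] (fun l => l ++ [p.1]))
      PySem.Dict.empty
  tweet.foldl (fun w word =>
    (PySem.Dict.getD index (PySem.Str.lower word) []).foldl
      (fun w i => PySem.List.pySetD w i 1) w)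
    [0, 0, 0, 0, 0, 0]

-- ===== PRECONDITION & SPEC =====
-- Pre_ excludes (a) inputs where a keyword whose first occurrence is at position >= 6 matches a
-- tweet word — both Pythons raise IndexError there — and (b) keyword lists containing an EXACT
-- duplicate keyword that matches a tweet word: A's .index-based marking of only the first
-- occurrence there is accidental (duplicate keys / first-vs-last corner); B marks every occurrence.
def Pre_vector_palabras_clavas (tweet : List String) (palabras_clave : List String) : Prop :=
  ∀ clave ∈ palabras_clave,
    (∃ word ∈ tweet, PySem.Str.lower word = PySem.Str.lower clave) →
      clave ∈ palabras_clave.take 6 ∧ palabras_clave.count clave = 1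
instance (tweet : List String) (palabras_clave : List String) : Decidable (Pre_vector_palabras_clavas tweet palabras_clave) := by unfold Pre_vector_palabras_clavas; infer_instance
def pvWitness_vector_palabras_clavas : List String × List String := (["Hola", "mundo"], ["hola", "Chau"])

def Spec_vector_palabras_clavas (tweet : List String) (palabras_clave : List String) (out : List Int) : Prop := out = vector_palabras_clavas_alt tweet palabras_clave
instance (tweet : List String) (palabras_clave : List String) (out : List Int) : Decidable (Spec_vector_palabras_clavas tweet palabras_clave out) := by unfold Spec_vector_palabras_clavas; infer_instance

-- ===== CLAIM (what is proved, stated in full; the proofs are below) =====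
def Claim_equal_vector_palabras_clavas : Prop := ∀ (tweet : List String) (palabras_clave : List String), Dom_vector_palabras_clavas tweet palabras_clave → Pre_vector_palabras_clavas tweet palabras_clave → Spec_vector_palabras_clavas tweet palabras_clave (vector_palabras_clavas tweet palabras_clave)

-- ===== LEMMAS AND PROOFS =====

-- A's inner loop: scanning the tweet for a match either sets w[j] := 1 (idempotently) or leaves w.
lemma pv_innerA (clave : String) (j : Nat) :
    ∀ (tweet : List String) (w : List Int),
      tweet.foldl (fun w word => if PySem.Str.lower word == PySem.Str.lower clave then w.set j 1 else w) w
      = if tweet.any (fun word => PySem.Str.lower word == PySem.Str.lower clave) then w.set j 1 else w := by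
  intro tweet
  induction tweet with
  | nil => intro w; simp
  | cons word rest ih =>
    intro w
    simp only [List.foldl_cons, List.any_cons]
    by_cases h : PySem.Str.lower word == PySem.Str.lower clave
    · simp only [h, if_true, Bool.true_or, ih]
      split <;> simp [List.set_set]
    · simp only [h, Bool.false_or, ih]
      simp

-- pointwise value of a "if cond then set (f clave) 1" fold (A's outer loop shape)
lemma pv_ptA (cond : String → Bool) (f : String → Nat) (j : Nat) :
    ∀ (l : List String) (w : List Int),
      (l.foldl (fun w clave => if cond clave then w.set (f clave) 1 else w) w)[j]?
      = if (l.any (fun clave => cond clave && f clave == j)) = true ∧ j < w.length then some 1 else w[j]? := by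
  intro l
  induction l with
  | nil => intro w; simp
  | cons c rest ih =>
    intro w
    simp only [List.foldl_cons, List.any_cons]
    by_cases hc : cond c
    · rw [if_pos hc, ih, List.length_set]
      by_cases hj : f c = j
      · subst hj
        by_cases hlen : f c < w.length
        · rw [List.getElem?_set_self hlen]
          simp [hc, hlen]
        · rw [List.set_eq_of_length_le (Nat.le_of_not_lt hlen)]
          simp [hlen]
      · rw [List.getElem?_set_ne hj]
        simp [hc, hj]
    · rw [if_neg hc, ih]
      simp [hc]

def pvHitA (tweet palabras_clave : List String) (j : Nat) : Bool :=
  palabras_clave.any (fun clave =>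
    tweet.any (fun word => PySem.Str.lower word == PySem.Str.lower clave)
    && ((PySem.List.index? palabras_clave clave).getD 0 == j))

lemma pv_A_getElem? (tweet pk : List String) (j : Nat) :
    (vector_palabras_clavas tweet pk)[j]? =
      if pvHitA tweet pk j = true ∧ j < 6 then some 1 else ([0, 0, 0, 0, 0, 0] : List Int)[j]? := by
  simp only [vector_palabras_clavas]
  rw [PySem.List.foldl_congr_mem pk
      (fun w clave => tweet.foldl (fun w word =>
        if PySem.Str.lower word == PySem.Str.lower clave then
          w.set ((PySem.List.index? pk clave).getD 0) 1 else w) w)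
      (fun w clave => if tweet.any (fun word => PySem.Str.lower word == PySem.Str.lower clave) then
          w.set ((PySem.List.index? pk clave).getD 0) 1 else w)
      ([0, 0, 0, 0, 0, 0] : List Int)
      (fun acc c _ => pv_innerA c ((PySem.List.index? pk c).getD 0) tweet acc)]
  rw [pv_ptA]
  rfl

-- the inverted index: the entry stored under key s is exactly the positions whose lowered keyword is s
lemma pv_dict (s : String) :
    ∀ (l : List (Int × String)) (d : PySem.Dict String (List Int)),
      PySem.Dict.getD (l.foldl (fun d p => PySem.Dict.modify d (PySem.Str.lower p.2) [] (fun t => t ++ [p.1])) d) s []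
      = PySem.Dict.getD d s [] ++ (l.filter (fun p => PySem.Str.lower p.2 == s)).map Prod.fst := by
  intro l
  induction l with
  | nil => intro d; simp
  | cons p rest ih =>
    intro d
    rw [List.foldl_cons, ih, PySem.Dict.getD_modify, List.filter_cons]
    by_cases h : PySem.Str.lower p.2 = s
    · simp [h, List.append_assoc]
    · simp [h, Ne.symm h]

-- pointwise value of the inner "for i in indices: w[i] = 1" fold (nonnegative indices)
lemma pv_setfold (j : Nat) :
    ∀ (is : List Int) (w : List Int), (∀ i ∈ is, 0 ≤ i) →
      (is.foldl (fun w i => PySem.List.pySetD w i 1) w)[j]?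
      = if ((j : Int) ∈ is) ∧ j < w.length then some 1 else w[j]? := by
  intro is
  induction is with
  | nil => intro w _; simp
  | cons i rest ih =>
    intro w hnn
    obtain ⟨n, rfl⟩ := Int.eq_ofNat_of_zero_le (hnn i List.mem_cons_self)
    rw [List.foldl_cons, PySem.List.pySetD_natCast,
        ih _ (fun x hx => hnn x (List.mem_cons_of_mem _ hx)), List.length_set]
    by_cases hnj : n = j
    · subst hnj
      by_cases hlen : n < w.length
      · rw [List.getElem?_set_self hlen]
        by_cases hr : ((n : Nat) : Int) ∈ rest <;> simp [hr, hlen]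
      · rw [List.set_eq_of_length_le (Nat.le_of_not_lt hlen)]
        simp [hlen]
    · rw [List.getElem?_set_ne hnj]
      have hne : ¬((j : Int) = (n : Int)) := by omega
      simp [List.mem_cons, hne]

lemma pv_setfold_length :
    ∀ (is : List Int) (w : List Int),
      (is.foldl (fun w i => PySem.List.pySetD w i 1) w).length = w.length := by
  intro is
  induction is with
  | nil => intro w; rfl
  | cons i rest ih =>
    intro w
    rw [List.foldl_cons, ih, PySem.List.length_pySetD]

-- pointwise value of B's tweet pass, for any index-list function with nonnegative entries
lemma pv_ptB (lst : String → List Int) (hnn : ∀ word, ∀ i ∈ lst word, 0 ≤ i) (j : Nat) :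
    ∀ (tweet : List String) (w : List Int),
      (tweet.foldl (fun w word => (lst word).foldl (fun w i => PySem.List.pySetD w i 1) w) w)[j]?
      = if (∃ word ∈ tweet, (j : Int) ∈ lst word) ∧ j < w.length then some 1 else w[j]? := by
  intro tweet
  induction tweet with
  | nil => intro w; simp
  | cons word rest ih =>
    intro w
    rw [List.foldl_cons, ih, pv_setfold_length, pv_setfold j _ w (hnn word)]
    by_cases hA : (∃ x ∈ rest, (j : Int) ∈ lst x) ∧ j < w.length
    · rw [if_pos hA, if_pos ⟨⟨hA.1.choose, List.mem_cons_of_mem _ hA.1.choose_spec.1,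
        hA.1.choose_spec.2⟩, hA.2⟩]
    · rw [if_neg hA]
      by_cases hB : (j : Int) ∈ lst word ∧ j < w.length
      · rw [if_pos hB, if_pos ⟨⟨word, List.mem_cons_self, hB.1⟩, hB.2⟩]
      · rw [if_neg hB, if_neg ?_]
        rintro ⟨⟨x, hx, hjx⟩, hl⟩
        rcases List.mem_cons.1 hx with rfl | hx
        · exact hB ⟨hjx, hl⟩
        · exact hA ⟨⟨x, hx, hjx⟩, hl⟩

lemma pv_B_getElem? (tweet pk : List String) (j : Nat) :
    (vector_palabras_clavas_alt tweet pk)[j]? =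
      if (∃ word ∈ tweet, ∃ k, ∃ hk : k < pk.length, k = j ∧
            PySem.Str.lower pk[k] = PySem.Str.lower word) ∧ j < 6
      then some 1 else ([0, 0, 0, 0, 0, 0] : List Int)[j]? := by
  unfold vector_palabras_clavas_alt
  rw [pv_ptB (fun word => PySem.Dict.getD
        ((PySem.List.enumerate pk 0).foldl
          (fun d p => PySem.Dict.modify d (PySem.Str.lower p.2) [] (fun l => l ++ [p.1]))
          PySem.Dict.empty) (PySem.Str.lower word) [])
      (by
        intro word i hi
        simp only [pv_dict, PySem.Dict.getD_empty, List.nil_append, List.mem_map,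
          List.mem_filter] at hi
        obtain ⟨p, ⟨hp, _⟩, rfl⟩ := hi
        rw [PySem.List.mem_enumerate_iff] at hp
        obtain ⟨k, hk, rfl⟩ := hp
        simp)]
  simp only [pv_dict, PySem.Dict.getD_empty, List.nil_append]
  refine if_congr ?_ rfl rfl
  constructor
  · rintro ⟨⟨word, hw, hj⟩, hlen⟩
    simp only [List.mem_map, List.mem_filter] at hj
    obtain ⟨p, ⟨hp, heq⟩, hfst⟩ := hj
    rw [PySem.List.mem_enumerate_iff] at hp
    obtain ⟨k, hk, rfl⟩ := hp
    simp only at hfst heq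
    refine ⟨⟨word, hw, k, hk, by omega, by simpa using heq⟩, by simpa using hlen⟩
  · rintro ⟨⟨word, hw, k, hk, rfl, hlow⟩, h6⟩
    refine ⟨⟨word, hw, ?_⟩, by simpa using h6⟩
    simp only [List.mem_map, List.mem_filter]
    refine ⟨((0 : Int) + (k : Int), pk[k]), ⟨?_, by simpa using hlow⟩, by simp⟩
    rw [PySem.List.mem_enumerate_iff]
    exact ⟨k, hk, rfl⟩

-- a keyword occurring exactly once is found by .index at its position
lemma pv_index_unique (pk : List String) (k : Nat) (hk : k < pk.length)
    (hcount : pk.count pk[k] = 1) :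
    PySem.List.index? pk pk[k] = some k := by
  have hnt : pk[k] ∉ pk.take k := by
    intro hmem
    have h1 : 1 ≤ (pk.take k).count pk[k] := List.one_le_count_iff.2 hmem
    have h2 : pk.count pk[k] = (pk.take k).count pk[k] + (pk.drop k).count pk[k] := by
      rw [← List.count_append, List.take_append_drop]
    have hmemd : pk[k] ∈ pk.drop k := by
      rw [List.mem_iff_getElem]
      exact ⟨0, by simp; omega, by simp⟩
    have h3 : 1 ≤ (pk.drop k).count pk[k] := List.one_le_count_iff.2 hmemd
    omega
  rw [PySem.List.index?_eq_some_iff]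
  refine ⟨pk.take k, pk.drop (k + 1), ?_, List.length_take_of_le (by omega), hnt⟩
  conv_lhs => rw [← List.take_append_drop k pk]
  rw [List.getElem_cons_drop]

-- the two hit-conditions agree under Pre_
lemma pv_hit_iff (tweet pk : List String) (j : Nat)
    (hpre : Pre_vector_palabras_clavas tweet pk) :
    (pvHitA tweet pk j = true ∧ j < 6) ↔
    ((∃ word ∈ tweet, ∃ k, ∃ hk : k < pk.length, k = j ∧
        PySem.Str.lower pk[k] = PySem.Str.lower word) ∧ j < 6) := by
  constructor
  · rintro ⟨hA, hj6⟩
    refine ⟨?_, hj6⟩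
    unfold pvHitA at hA
    rw [List.any_eq_true] at hA
    obtain ⟨clave, hmem, hcl⟩ := hA
    rw [Bool.and_eq_true] at hcl
    obtain ⟨hmatch, hidx⟩ := hcl
    obtain ⟨k, hik⟩ : ∃ k, PySem.List.index? pk clave = some k := by
      rcases h : PySem.List.index? pk clave with _ | k
      · exact absurd hmem ((PySem.List.index?_eq_none_iff pk clave).1 h)
      · exact ⟨k, rfl⟩
    obtain ⟨hk, hgk, _⟩ := PySem.List.getElem_of_index?_eq_some hik
    have hkj : k = j := by rw [hik] at hidx; simpa using hidx
    subst hkj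
    rw [List.any_eq_true] at hmatch
    obtain ⟨word, hw, hweq⟩ := hmatch
    have hlw : PySem.Str.lower word = PySem.Str.lower clave := by simpa using hweq
    refine ⟨word, hw, k, hk, rfl, ?_⟩
    rw [hgk]
    exact hlw.symm
  · rintro ⟨⟨word, hw, k, hk, rfl, hlow⟩, h6⟩
    refine ⟨?_, h6⟩
    have hmem : pk[k] ∈ pk := List.getElem_mem hk
    obtain ⟨htake, hcount⟩ := hpre pk[k] hmem ⟨word, hw, hlow.symm⟩
    unfold pvHitA
    rw [List.any_eq_true]
    refine ⟨pk[k], hmem, ?_⟩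
    rw [Bool.and_eq_true]
    have hany : tweet.any (fun word => PySem.Str.lower word == PySem.Str.lower pk[k]) = true :=
      List.any_eq_true.2 ⟨word, hw, by simpa using hlow.symm⟩
    refine ⟨hany, ?_⟩
    rw [pv_index_unique pk k hk hcount]
    simp

-- ===== VERDICT (by name: the statement is the Claim_ definition above) =====
theorem vector_palabras_clavas_spec : Claim_equal_vector_palabras_clavas := by
  intro tweet pk _dom hpre
  unfold Spec_vector_palabras_clavas
  apply List.ext_getElem?
  intro j
  rw [pv_A_getElem?, pv_B_getElem?]
  exact if_congr (pv_hit_iff tweet pk j hpre) rfl rfl
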